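-- pv_equiv track=rewrite | github.com/kknaks/app_builder_local | backend/app/services/sprint_service.py | _detect_error_in_output
-- ===== SOURCE A (Python) =====
-- def _detect_error_in_output(output: str) -> str | None:
--     """Detect build/test errors in agent output.
--
--     Returns error text if errors found, None otherwise.
--     """
--     error_indicators = [
--         "FAILED",
--         "Error:",
--         "error:",
--         "ERROR",
--         "SyntaxError",
--         "TypeError",
--         "ImportError",
--         "ModuleNotFoundError",
--         "Build failed",
--         "build failed",
--         "Test failed",
--         "test failed",
--         "ERRORS",
--         "Traceback (most recent call last)",
--         "exit code 1",
--         "exit status 1",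
--     ]
--
--     lines = output.split("\n")
--     error_lines: list[str] = []
--     capturing = False
--
--     for line in lines:
--         if any(indicator in line for indicator in error_indicators):
--             capturing = True
--
--         if capturing:
--             error_lines.append(line)
--
--         # Stop capturing after 50 lines of error context
--         if capturing and len(error_lines) >= 50:
--             break
--
--     if error_lines:
--         return "\n".join(error_lines)
--     return None
-- ===== SOURCE B (Python) =====
-- def _detect_error_in_output(output: str) -> str | None:
--     """Detect build/test errors in agent output.
--
--     Inverted loop nesting: for each indicator, find the first line that
--     contains it; take the minimum of those line indices (the first line
--     containing any indicator), then return the up-to-50-line window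
--     starting there.
--     """
--     error_indicators = [
--         "FAILED",
--         "Error:",
--         "error:",
--         "ERROR",
--         "SyntaxError",
--         "TypeError",
--         "ImportError",
--         "ModuleNotFoundError",
--         "Build failed",
--         "build failed",
--         "Test failed",
--         "test failed",
--         "ERRORS",
--         "Traceback (most recent call last)",
--         "exit code 1",
--         "exit status 1",
--     ]
--
--     lines = output.split("\n")
--     best = None
--     for indicator in error_indicators:
--         for i, line in enumerate(lines):
--             if indicator in line:
--                 if best is None or i < best:
--                     best = i
--                 break
--     if best is None:
--         return None
--     return "\n".join(lines[best:best + 50])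
-- ===== Notes on version B (the rewrite author's own statement) =====
-- stated objective: alternative
-- what changed: Inverts the loop nesting: instead of A's single pass over lines with a capturing flag testing every indicator per line, B searches per indicator for the first line containing it, takes the minimum of those line indices, and returns the 50-line window sliced from there.
import Mathlib
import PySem

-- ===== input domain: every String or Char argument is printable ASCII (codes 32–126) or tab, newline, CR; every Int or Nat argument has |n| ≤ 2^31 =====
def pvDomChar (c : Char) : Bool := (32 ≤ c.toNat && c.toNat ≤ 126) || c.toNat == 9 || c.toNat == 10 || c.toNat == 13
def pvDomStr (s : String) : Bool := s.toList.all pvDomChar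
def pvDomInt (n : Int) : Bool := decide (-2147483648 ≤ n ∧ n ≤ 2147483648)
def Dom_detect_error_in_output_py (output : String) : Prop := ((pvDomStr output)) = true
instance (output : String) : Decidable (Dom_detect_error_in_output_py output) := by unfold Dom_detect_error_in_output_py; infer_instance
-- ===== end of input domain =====

-- B inverts A's loop nesting: per-indicator first-line search plus minimum index, instead of a
-- per-line capturing-flag loop; same return value (alternative decomposition, no speed claim).

-- The indicator list is textually identical in A and B, so both ports share it.
def pvErrorIndicators : List String :=
  ["FAILED", "Error:", "error:", "ERROR", "SyntaxError", "TypeError", "ImportError",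
   "ModuleNotFoundError", "Build failed", "build failed", "Test failed", "test failed",
   "ERRORS", "Traceback (most recent call last)", "exit code 1", "exit status 1"]

-- output.split("\n"): sep ≠ "" so split? is always some; getD [] is only a totality guard
def pvSplitLines (output : String) : List String :=
  (PySem.Str.split? output "\n").getD []

-- ===== PORT A =====
-- any(indicator in line for indicator in error_indicators)
def pvMatches (line : String) : Bool :=
  pvErrorIndicators.any (fun ind => PySem.Str.isIn ind line)

-- the for-loop over lines with state (error_lines, capturing) and the break on 50
def pvLoopA : List String → List String → Bool → List String
  | [], acc, _ => acc
  | l :: rest, acc, cap =>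
    let cap' := cap || pvMatches l
    let acc' := if cap' then acc ++ [l] else acc
    if cap' && decide (50 ≤ acc'.length) then acc' else pvLoopA rest acc' cap'

def detect_error_in_output_py (output : String) : Option String :=
  let lines := pvSplitLines output
  let errorLines := pvLoopA lines [] false
  if errorLines.isEmpty then none
  else some (PySem.Str.join "\n" errorLines)

-- ===== PORT B =====
-- inner loop: 'for i, line in enumerate(lines): if indicator in line: …; break'
def pvFindLine (ind : String) : List String → Nat → Option Nat
  | [], _ => none
  | l :: rest, i => if PySem.Str.isIn ind l then some i else pvFindLine ind rest (i + 1)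

-- outer loop over the indicators, keeping the smallest found index in 'best'
def pvBestIdx (lines : List String) : Option Nat :=
  pvErrorIndicators.foldl
    (fun best ind =>
      match pvFindLine ind lines 0 with
      | none => best
      | some i =>
        match best with
        | none => some i
        | some b => if i < b then some i else some b)
    none

def detect_error_in_output_py_alt (output : String) : Option String :=
  let lines := pvSplitLines output
  match pvBestIdx lines with
  | none => none
  -- lines[best:best+50] with 0 ≤ best < len(lines): exact as drop-then-take
  | some i => some (PySem.Str.join "\n" ((lines.drop i).take 50))

-- ===== PRECONDITION & SPEC =====
def Spec_detect_error_in_output_py (output : String) (out : Option String) : Prop := out = detect_error_in_output_py_alt output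
instance (output : String) (out : Option String) : Decidable (Spec_detect_error_in_output_py output out) := by unfold Spec_detect_error_in_output_py; infer_instance

-- ===== CLAIM (what is proved, stated in full; the proofs are below) =====
def Claim_equal_detect_error_in_output_py : Prop := ∀ (output : String), Dom_detect_error_in_output_py output → Spec_detect_error_in_output_py output (detect_error_in_output_py output)

-- ===== LEMMAS AND PROOFS =====

-- proof-side helper: the index of the first line satisfying pvMatches
def pvFirstIdx : List String → Nat → Option Nat
  | [], _ => none
  | l :: rest, i => if pvMatches l then some i else pvFirstIdx rest (i + 1)

-- the one foldl step of pvBestIdx, named for the lemmas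
def pvStep (lines : List String) (best : Option Nat) (ind : String) : Option Nat :=
  match pvFindLine ind lines 0 with
  | none => best
  | some i =>
    match best with
    | none => some i
    | some b => if i < b then some i else some b

lemma pvBestIdx_eq_foldl (lines : List String) :
    pvBestIdx lines = pvErrorIndicators.foldl (pvStep lines) none := by
  rfl

---- A-side characterisation ----

lemma pvLoopA_cons_true (l : String) (rest acc : List String) :
    pvLoopA (l :: rest) acc true =
      if 50 ≤ acc.length + 1 then acc ++ [l] else pvLoopA rest (acc ++ [l]) true := by
  simp [pvLoopA]

lemma pvLoopA_cons_false_match (l : String) (rest acc : List String) (hm : pvMatches l = true) :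
    pvLoopA (l :: rest) acc false =
      if 50 ≤ acc.length + 1 then acc ++ [l] else pvLoopA rest (acc ++ [l]) true := by
  simp [pvLoopA, hm]

lemma pvLoopA_cons_false_nomatch (l : String) (rest acc : List String) (hm : pvMatches l = false) :
    pvLoopA (l :: rest) acc false = pvLoopA rest acc false := by
  simp [pvLoopA, hm]

-- once capturing, A's loop just collects lines until the buffer reaches 50
lemma pvLoopA_capturing (ls : List String) :
    ∀ acc : List String, acc.length < 50 → pvLoopA ls acc true = acc ++ ls.take (50 - acc.length) := by
  induction ls with
  | nil => intro acc _; simp [pvLoopA]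
  | cons l rest ih =>
    intro acc h
    rw [pvLoopA_cons_true]
    by_cases h49 : acc.length = 49
    · have h1 : 50 - acc.length = 1 := by omega
      rw [if_pos (by omega), h1]
      simp
    · rw [if_neg (by omega)]
      rw [ih (acc ++ [l]) (by simp; omega)]
      have h1 : 50 - acc.length = (50 - (acc ++ [l]).length) + 1 := by simp; omega
      simp only [h1, List.take_succ_cons, List.append_assoc, List.singleton_append]

lemma pvFirstIdx_shift (ls : List String) :
    ∀ i : Nat, pvFirstIdx ls i = (pvFirstIdx ls 0).map (· + i) := by
  induction ls with
  | nil => intro i; simp [pvFirstIdx]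
  | cons l rest ih =>
    intro i
    by_cases hm : pvMatches l
    · simp [pvFirstIdx, hm]
    · simp only [pvFirstIdx, if_neg hm]
      rw [ih (i + 1), ih 1]
      cases pvFirstIdx rest 0 with
      | none => simp
      | some j => simp; omega

lemma pvFirstIdx_lt (ls : List String) :
    ∀ i : Nat, pvFirstIdx ls 0 = some i → i < ls.length := by
  induction ls with
  | nil => intro i h; simp [pvFirstIdx] at h
  | cons l rest ih =>
    intro i h
    by_cases hm : pvMatches l
    · simp [pvFirstIdx, hm] at h; simp; omega
    · simp only [pvFirstIdx, if_neg hm] at h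
      rw [pvFirstIdx_shift rest 1] at h
      cases hr : pvFirstIdx rest 0 with
      | none => rw [hr] at h; simp at h
      | some j =>
        rw [hr] at h; simp at h
        have := ih j hr
        simp; omega

-- A's loop result, characterised by the index of the first matching line
lemma pvLoopA_eq_window (ls : List String) :
    pvLoopA ls [] false =
      (match pvFirstIdx ls 0 with
       | none => []
       | some i => (ls.drop i).take 50) := by
  induction ls with
  | nil => simp [pvLoopA, pvFirstIdx]
  | cons l rest ih =>
    by_cases hm : pvMatches l
    · rw [pvLoopA_cons_false_match l rest [] hm]
      rw [if_neg (by simp)]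
      simp only [List.nil_append]
      rw [pvLoopA_capturing rest [l] (by simp)]
      simp [pvFirstIdx, hm, List.take_succ_cons]
    · rw [pvLoopA_cons_false_nomatch l rest [] (by simpa using hm)]
      rw [ih]
      simp only [pvFirstIdx, if_neg hm]
      rw [pvFirstIdx_shift rest 1]
      cases hr : pvFirstIdx rest 0 with
      | none => simp
      | some j => simp

---- B-side: the min over per-indicator first indices is the first any-indicator index ----

lemma pvFindLine_shift (ind : String) (ls : List String) :
    ∀ i : Nat, pvFindLine ind ls i = (pvFindLine ind ls 0).map (· + i) := by
  induction ls with
  | nil => intro i; simp [pvFindLine]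
  | cons l rest ih =>
    intro i
    by_cases hm : PySem.Str.isIn ind l
    · simp only [pvFindLine, if_pos hm, Option.map_some]
      simp
    · simp only [pvFindLine, if_neg hm]
      rw [ih (i + 1), ih 1]
      cases pvFindLine ind rest 0 with
      | none => simp
      | some j => simp; omega

-- generalised first-any index, parametrised by the indicator list (for the induction)
def pvFirstIdxG (inds : List String) : List String → Option Nat
  | [] => none
  | l :: rest =>
    if inds.any (fun ind => PySem.Str.isIn ind l) then some 0
    else (pvFirstIdxG inds rest).map (· + 1)

lemma pvFirstIdxG_eq_pvFirstIdx (ls : List String) :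
    pvFirstIdxG pvErrorIndicators ls = pvFirstIdx ls 0 := by
  induction ls with
  | nil => simp [pvFirstIdxG, pvFirstIdx]
  | cons l rest ih =>
    by_cases hm : pvMatches l
    · have hm' : pvErrorIndicators.any (fun ind => PySem.Str.isIn ind l) = true := hm
      simp only [pvFirstIdxG, pvFirstIdx, if_pos hm', if_pos hm]
    · have hm' : pvErrorIndicators.any (fun ind => PySem.Str.isIn ind l) = false := by
        simpa [pvMatches] using hm
      simp only [pvFirstIdxG, pvFirstIdx, hm', if_neg hm, Bool.false_eq_true, if_false]
      rw [pvFirstIdx_shift rest 1, ih]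

-- once best = some 0 it stays some 0
lemma foldl_step_some_zero (lines : List String) (inds : List String) :
    List.foldl (pvStep lines) (some 0) inds = some 0 := by
  induction inds with
  | nil => rfl
  | cons ind rest ih =>
    have : pvStep lines (some 0) ind = some 0 := by
      unfold pvStep
      cases pvFindLine ind lines 0 with
      | none => rfl
      | some i => simp
    simp [List.foldl, this, ih]

-- if some indicator finds index 0, the fold returns some 0 whatever the accumulator
lemma foldl_step_of_exists_zero (lines : List String) (inds : List String)
    (h : ∃ ind ∈ inds, pvFindLine ind lines 0 = some 0) :
    ∀ best, List.foldl (pvStep lines) best inds = some 0 := by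
  induction inds with
  | nil => rcases h with ⟨_, h, _⟩; simp at h
  | cons ind rest ih =>
    intro best
    rcases h with ⟨w, hw, hw0⟩
    rcases List.mem_cons.mp hw with rfl | hwrest
    · have : pvStep lines best w = some 0 := by
        unfold pvStep
        rw [hw0]
        cases best with
        | none => rfl
        | some b => simp
      simp [List.foldl, this, foldl_step_some_zero]
    · exact ih ⟨w, hwrest, hw0⟩ _
-- the fold over shifted per-indicator indices is the shifted fold
lemma foldl_step_shift (l : String) (rest : List String) (inds : List String)
    (h : ∀ ind ∈ inds, PySem.Str.isIn ind l = false) :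
    ∀ best : Option Nat,
      List.foldl (pvStep (l :: rest)) (best.map (· + 1)) inds =
        (List.foldl (pvStep rest) best inds).map (· + 1) := by
  induction inds with
  | nil => intro best; rfl
  | cons ind inds' ih =>
    intro best
    have hl : PySem.Str.isIn ind l = false := h ind (by simp)
    have hfl : pvFindLine ind (l :: rest) 0 = (pvFindLine ind rest 0).map (· + 1) := by
      simp only [pvFindLine, hl, Bool.false_eq_true, if_false]
      exact pvFindLine_shift ind rest 1
    have hstep : pvStep (l :: rest) (best.map (· + 1)) ind =
        (pvStep rest best ind).map (· + 1) := by
      unfold pvStep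
      rw [hfl]
      cases pvFindLine ind rest 0 with
      | none => simp
      | some i =>
        cases best with
        | none => simp
        | some b =>
          by_cases hib : i < b
          · simp [hib]
          · have : ¬ i + 1 < b + 1 := by omega
            simp [hib, this]
    rw [List.foldl_cons, List.foldl_cons, hstep,
      ih (fun i hi => h i (by simp [hi])) (pvStep rest best ind)]

-- the minimum over per-indicator first-line indices is the first any-indicator index
lemma foldl_step_eq_firstIdxG (inds : List String) (ls : List String) :
    List.foldl (pvStep ls) none inds = pvFirstIdxG inds ls := by
  induction ls with
  | nil =>
    have : ∀ best, List.foldl (pvStep ([] : List String)) best inds = best := by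
      induction inds with
      | nil => intro best; rfl
      | cons ind rest ih => intro best; simp [List.foldl, pvStep, pvFindLine, ih]
    simp [this, pvFirstIdxG]
  | cons l rest ih =>
    by_cases hm : inds.any (fun ind => PySem.Str.isIn ind l)
    · rcases List.any_eq_true.mp hm with ⟨w, hw, hwl⟩
      rw [foldl_step_of_exists_zero (l :: rest) inds
        ⟨w, hw, by simp only [pvFindLine, if_pos hwl]⟩ none]
      simp only [pvFirstIdxG, if_pos hm]
    · have h' : ∀ ind ∈ inds, PySem.Str.isIn ind l = false := by
        intro ind hi
        by_contra hc
        exact hm (List.any_eq_true.mpr ⟨ind, hi, by simpa using hc⟩)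
      have := foldl_step_shift l rest inds h' none
      simp only [Option.map_none] at this
      rw [this, ih]
      simp only [pvFirstIdxG, if_neg hm]

lemma pvBestIdx_eq_pvFirstIdx (ls : List String) :
    pvBestIdx ls = pvFirstIdx ls 0 := by
  rw [pvBestIdx_eq_foldl, foldl_step_eq_firstIdxG, pvFirstIdxG_eq_pvFirstIdx]

-- ===== VERDICT (by name: the statement is the Claim_ definition above) =====
theorem detect_error_in_output_py_spec : Claim_equal_detect_error_in_output_py := by
  intro output _
  show detect_error_in_output_py output = detect_error_in_output_py_alt output
  simp only [detect_error_in_output_py, detect_error_in_output_py_alt]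
  rw [pvLoopA_eq_window, pvBestIdx_eq_pvFirstIdx]
  cases hr : pvFirstIdx (pvSplitLines output) 0 with
  | none => simp
  | some i =>
    have hi := pvFirstIdx_lt _ i hr
    have hne : ¬ (((pvSplitLines output).drop i).take 50).isEmpty = true := by
      simp [List.isEmpty_iff, List.take_eq_nil_iff, List.drop_eq_nil_iff]
      omega
    simp [hne]
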